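-- pv_equiv track=rewrite | github.com/jvhaa/CCC-Canadian-Computing-Competition | J5/CCC '23 J5 - CCC Word Hunt.py | findcon
-- ===== SOURCE A (Python) =====
-- def findcon(chars):
--     keys = list(chars.keys())
--     connections = {}
--     for i in range(len(keys)-1):
--         connections[keys[i] + keys[i+1]] = []
--     for i in range(len(keys)-1):
--         for coord1 in chars[keys[i]]:
--             for coord2 in chars[keys[i+1]]:
--                 if abs(coord1[0]-coord2[0]) < 2 and abs(coord1[1]-coord2[1]) < 2:
--                     connections[keys[i] + keys[i+1]].append(list((coord1, coord2)))
--     return connections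
-- ===== SOURCE B (Python) =====
-- def findcon(chars):
--     keys = list(chars.keys())
--     connections = {}
--     for i in range(len(keys) - 1):
--         connections[keys[i] + keys[i + 1]] = []
--     for i in range(len(keys) - 1):
--         lst2 = chars[keys[i + 1]]
--         pos = {}
--         for j, c2 in enumerate(lst2):
--             pos.setdefault(c2, []).append(j)
--         key = keys[i] + keys[i + 1]
--         for c1 in chars[keys[i]]:
--             idxs = []
--             for dx in (-1, 0, 1):
--                 for dy in (-1, 0, 1):
--                     idxs += pos.get((c1[0] + dx, c1[1] + dy), [])
--             idxs.sort()
--             for j in idxs: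
--                 connections[key].append([c1, lst2[j]])
--     return connections
-- ===== Notes on version B (the rewrite author's own statement) =====
-- stated objective: alternative
-- what changed: Instead of scanning all of chars[keys[i+1]] for every coord1 (all-pairs adjacency test), B builds one coordinate->indices dict per letter pair and probes only the 9 neighbouring cells of each coord1, restoring A's output order by sorting the matched indices.
import Mathlib
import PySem

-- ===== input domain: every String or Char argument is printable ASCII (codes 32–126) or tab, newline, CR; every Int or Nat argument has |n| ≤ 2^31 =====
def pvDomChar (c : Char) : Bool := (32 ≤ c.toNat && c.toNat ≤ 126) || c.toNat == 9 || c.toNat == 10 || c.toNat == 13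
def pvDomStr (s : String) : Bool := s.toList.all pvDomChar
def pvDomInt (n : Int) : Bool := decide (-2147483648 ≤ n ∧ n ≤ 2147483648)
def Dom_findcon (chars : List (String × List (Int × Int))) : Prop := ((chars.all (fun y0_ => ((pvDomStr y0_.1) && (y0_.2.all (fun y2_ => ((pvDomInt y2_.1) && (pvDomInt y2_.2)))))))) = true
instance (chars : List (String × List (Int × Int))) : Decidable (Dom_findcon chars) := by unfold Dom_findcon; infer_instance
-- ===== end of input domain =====

-- B replaces A's inner scan of chars[keys[i+1]] per coord1 by a coordinate→indices map probed
-- at the 9 neighbour cells (matches re-ordered by index sort); return value only, no mutation.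

-- ===== PORT A =====
def findcon (chars : List (String × List (Int × Int))) : List (String × List (List (Int × Int))) :=
  let d := PySem.Dict.ofList chars
  let keys := d.keys
  let conns : PySem.Dict String (List (List (Int × Int))) :=
    (List.range (keys.length - 1)).foldl
      (fun c i => c.insert (keys.getD i "" ++ keys.getD (i + 1) "") []) PySem.Dict.empty
  let conns :=
    (List.range (keys.length - 1)).foldl
      (fun c i =>
        (d.getD (keys.getD i "") []).foldl
          (fun c c1 =>
            (d.getD (keys.getD (i + 1) "") []).foldl
              (fun c c2 =>
                if |c1.1 - c2.1| < 2 ∧ |c1.2 - c2.2| < 2 then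
                  c.modify (keys.getD i "" ++ keys.getD (i + 1) "") [] (· ++ [[c1, c2]])
                else c)
              c)
          c)
      conns
  conns.items

-- ===== PORT B =====
def findcon_alt (chars : List (String × List (Int × Int))) : List (String × List (List (Int × Int))) :=
  let d := PySem.Dict.ofList chars
  let keys := d.keys
  let conns : PySem.Dict String (List (List (Int × Int))) :=
    (List.range (keys.length - 1)).foldl
      (fun c i => c.insert (keys.getD i "" ++ keys.getD (i + 1) "") []) PySem.Dict.empty
  let conns :=
    (List.range (keys.length - 1)).foldl
      (fun c i =>
        let lst2 := d.getD (keys.getD (i + 1) "") []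
        -- pos.setdefault(c2, []).append(j) : the stored list at c2 gains j (default [] when absent)
        let pos : PySem.Dict (Int × Int) (List Int) :=
          (PySem.List.enumerate lst2).foldl (fun p q => p.modify q.2 [] (· ++ [q.1])) PySem.Dict.empty
        let key := keys.getD i "" ++ keys.getD (i + 1) ""
        (d.getD (keys.getD i "") []).foldl
          (fun c c1 =>
            let idxs : List Int :=
              [(-1 : Int), 0, 1].foldl (fun a dx =>
                [(-1 : Int), 0, 1].foldl (fun a dy =>
                  a ++ pos.getD (c1.1 + dx, c1.2 + dy) []) a) []
            let sidxs := PySem.List.sorted idxs (fun j => j)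
            -- lst2[j] with j always a valid index; the pyGetD default is never read
            sidxs.foldl
              (fun c j => c.modify key [] (· ++ [[c1, PySem.List.pyGetD lst2 j (0, 0)]])) c)
          c)
      conns
  conns.items

-- ===== PRECONDITION & SPEC =====
def Spec_findcon (chars : List (String × List (Int × Int))) (out : List (String × List (List (Int × Int)))) : Prop := out = findcon_alt chars
instance (chars : List (String × List (Int × Int))) (out : List (String × List (List (Int × Int)))) : Decidable (Spec_findcon chars out) := by unfold Spec_findcon; infer_instance

-- ===== CLAIM (what is proved, stated in full; the proofs are below) =====
def Claim_equal_findcon : Prop := ∀ (chars : List (String × List (Int × Int))), Dom_findcon chars → Spec_findcon chars (findcon chars)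

-- ===== LEMMAS AND PROOFS =====

-- adjacency test of A, as a Bool
def pvAdj (c1 c2 : Int × Int) : Bool := decide (|c1.1 - c2.1| < 2 ∧ |c1.2 - c2.2| < 2)

-- the position→indices dict B builds for the second letter's coordinate list
def pvPos (l2 : List (Int × Int)) : PySem.Dict (Int × Int) (List Int) :=
  (PySem.List.enumerate l2).foldl (fun p q => p.modify q.2 [] (· ++ [q.1])) PySem.Dict.empty

-- the (unsorted) index list B collects for one coordinate c1
def pvIdxs (l2 : List (Int × Int)) (c1 : Int × Int) : List Int :=
  [(-1 : Int), 0, 1].foldl (fun a dx =>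
    [(-1 : Int), 0, 1].foldl (fun a dy =>
      a ++ (pvPos l2).getD (c1.1 + dx, c1.2 + dy) []) a) []


lemma enum_cons (x : Int × Int) (t : List (Int × Int)) (s : Int) :
    PySem.List.enumerate (x :: t) s = (s, x) :: PySem.List.enumerate t (s + 1) := by
  simp [PySem.List.enumerate]

lemma enum_snd (l : List (Int × Int)) (s : Int) :
    (PySem.List.enumerate l s).map (·.2) = l := by
  induction l generalizing s with
  | nil => simp [PySem.List.enumerate]
  | cons x t ih => rw [enum_cons]; simp [ih]

lemma mem_enum (l : List (Int × Int)) (s : Int) (p : Int × (Int × Int)) :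
    p ∈ PySem.List.enumerate l s ↔ ∃ k : Nat, l[k]? = some p.2 ∧ p.1 = s + k := by
  induction l generalizing s with
  | nil => simp [PySem.List.enumerate]
  | cons x t ih =>
    rw [enum_cons]
    simp only [List.mem_cons, ih]
    constructor
    · rintro (rfl | ⟨k, hk, hp⟩)
      · exact ⟨0, by simp⟩
      · exact ⟨k + 1, by simpa using hk, by push_cast; omega⟩
    · rintro ⟨k, hk, hp⟩
      cases k with
      | zero =>
        left
        simp only [List.getElem?_cons_zero, Option.some.injEq] at hk
        obtain ⟨a, b⟩ := p
        simp only [] at hk hp ⊢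
        simp at hp
        simp [hp, ← hk]
      | succ k =>
        right
        exact ⟨k, by simpa using hk, by push_cast at hp ⊢; omega⟩

lemma enum_pairwise (l : List (Int × Int)) (s : Int) :
    (PySem.List.enumerate l s).Pairwise (fun p q => p.1 < q.1) := by
  induction l generalizing s with
  | nil => simp [PySem.List.enumerate]
  | cons x t ih =>
    rw [enum_cons]
    refine List.Pairwise.cons ?_ (ih (s + 1))
    intro q hq
    obtain ⟨k, _, hk⟩ := (mem_enum t (s + 1) q).1 hq
    simp only []
    omega

lemma enum_fst_inj {l : List (Int × Int)} {s : Int} {p q : Int × (Int × Int)}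
    (hp : p ∈ PySem.List.enumerate l s) (hq : q ∈ PySem.List.enumerate l s)
    (h : p.1 = q.1) : p = q := by
  obtain ⟨k, hk, hks⟩ := (mem_enum l s p).1 hp
  obtain ⟨k', hk', hks'⟩ := (mem_enum l s q).1 hq
  have hkk : k = k' := by omega
  subst hkk
  rw [hk, Option.some.injEq] at hk'
  exact Prod.ext h hk'

lemma pos_getD (l2 : List (Int × Int)) (q : Int × Int) :
    (pvPos l2).getD q [] =
      ((PySem.List.enumerate l2).filter (fun p => p.2 == q)).map (·.1) := by
  unfold pvPos
  have h : (PySem.List.enumerate l2 0).foldl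
        (fun p q => p.modify q.2 [] (· ++ [q.1])) PySem.Dict.empty
      = ((PySem.List.enumerate l2 0).map Prod.swap).foldl
        (fun (d : PySem.Dict (Int × Int) (List Int)) p => d.modify p.1 [] (· ++ [p.2]))
        PySem.Dict.empty := by
    rw [List.foldl_map]; rfl
  rw [h, PySem.Dict.getD_foldl_modify_append]
  rw [List.filter_map, List.map_map]
  simp [Function.comp_def, PySem.Dict.getD_empty]

lemma pos_mem (l2 : List (Int × Int)) (q : Int × Int) (x : Int) :
    x ∈ (pvPos l2).getD q [] ↔ (x, q) ∈ PySem.List.enumerate l2 0 := by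
  rw [pos_getD]
  simp only [List.mem_map, List.mem_filter, beq_iff_eq]
  constructor
  · rintro ⟨⟨a, b⟩, ⟨hp, hq⟩, hx⟩
    simp only [] at hq hx
    subst hq; subst hx; exact hp
  · intro h
    exact ⟨(x, q), ⟨h, rfl⟩, rfl⟩

lemma pos_nodup (l2 : List (Int × Int)) (q : Int × Int) :
    ((pvPos l2).getD q []).Nodup := by
  rw [pos_getD]
  exact List.pairwise_map.2
    (((enum_pairwise l2 0).filter _).imp fun h => ne_of_lt h)

lemma pos_disjoint (l2 : List (Int × Int)) {q q' : Int × Int} (h : q ≠ q') :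
    List.Disjoint ((pvPos l2).getD q []) ((pvPos l2).getD q' []) := by
  intro x hx hx'
  rw [pos_mem] at hx hx'
  exact h (by have := enum_fst_inj hx hx' rfl; simpa using this)

lemma adj_iff (c1 c : Int × Int) :
    pvAdj c1 c = true ↔
      ∃ dx ∈ ([-1, 0, 1] : List Int), ∃ dy ∈ ([-1, 0, 1] : List Int),
        c = (c1.1 + dx, c1.2 + dy) := by
  unfold pvAdj
  rw [decide_eq_true_iff]
  simp only [abs_lt]
  constructor
  · rintro ⟨⟨h1, h1'⟩, h2, h2'⟩
    refine ⟨c.1 - c1.1, by simp; omega, c.2 - c1.2, by simp; omega, ?_⟩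
    simp
  · rintro ⟨dx, hdx, dy, hdy, rfl⟩
    simp only [List.mem_cons, List.not_mem_nil, or_false] at hdx hdy
    dsimp only
    obtain rfl | rfl | rfl := hdx <;> obtain rfl | rfl | rfl := hdy <;> omega

lemma idxs_flat (l2 : List (Int × Int)) (c1 : Int × Int) :
    pvIdxs l2 c1 =
      ([-1, 0, 1] : List Int).flatMap (fun dx =>
        ([-1, 0, 1] : List Int).flatMap (fun dy =>
          (pvPos l2).getD (c1.1 + dx, c1.2 + dy) [])) := by
  unfold pvIdxs
  simp only [PySem.List.foldl_append_eq_flatMap, List.nil_append]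

lemma mem_idxs (l2 : List (Int × Int)) (c1 : Int × Int) (x : Int) :
    x ∈ pvIdxs l2 c1 ↔
      ∃ c, (x, c) ∈ PySem.List.enumerate l2 0 ∧ pvAdj c1 c = true := by
  rw [idxs_flat]
  simp only [List.mem_flatMap, pos_mem]
  constructor
  · rintro ⟨dx, hdx, dy, hdy, hmem⟩
    exact ⟨(c1.1 + dx, c1.2 + dy), hmem, (adj_iff c1 _).2 ⟨dx, hdx, dy, hdy, rfl⟩⟩
  · rintro ⟨c, hc, hadj⟩
    obtain ⟨dx, hdx, dy, hdy, rfl⟩ := (adj_iff c1 c).1 hadj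
    exact ⟨dx, hdx, dy, hdy, hc⟩

lemma idxs_nodup (l2 : List (Int × Int)) (c1 : Int × Int) : (pvIdxs l2 c1).Nodup := by
  rw [idxs_flat, List.nodup_flatMap]
  have hne : List.Pairwise (· ≠ ·) ([-1, 0, 1] : List Int) := by decide
  refine ⟨fun dx _ => ?_, ?_⟩
  · rw [List.nodup_flatMap]
    refine ⟨fun dy _ => pos_nodup l2 _, ?_⟩
    refine hne.imp fun {a b} hab => pos_disjoint l2 ?_
    intro hq
    apply hab
    have := congrArg Prod.snd hq
    simp only [] at this
    omega
  · refine hne.imp fun {a b} hab => ?_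
    intro x hx hx'
    simp only [List.mem_flatMap, pos_mem] at hx hx'
    obtain ⟨dy, _, hc⟩ := hx
    obtain ⟨dy', _, hc'⟩ := hx'
    have := enum_fst_inj hc hc' rfl
    simp only [Prod.ext_iff] at this
    obtain ⟨⟨h1, _⟩, _⟩ := this
    omega

lemma sorted_idxs (l2 : List (Int × Int)) (c1 : Int × Int) :
    PySem.List.sorted (pvIdxs l2 c1) (fun j => j) =
      ((PySem.List.enumerate l2).filter (fun p => pvAdj c1 p.2)).map (·.1) := by
  apply PySem.List.sorted_eq_of_perm_of_pairwise_lt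
  · have hT : (((PySem.List.enumerate l2 0).filter (fun p => pvAdj c1 p.2)).map (·.1)).Nodup :=
      List.pairwise_map.2 (((enum_pairwise l2 0).filter _).imp fun h => ne_of_lt h)
    rw [List.perm_ext_iff_of_nodup hT (idxs_nodup l2 c1)]
    intro x
    rw [mem_idxs]
    simp only [List.mem_map, List.mem_filter]
    constructor
    · rintro ⟨⟨a, c⟩, ⟨hp, hadj⟩, hx⟩
      simp only [] at hx
      subst hx
      exact ⟨c, hp, hadj⟩
    · rintro ⟨c, hc, hadj⟩
      exact ⟨(x, c), ⟨hc, hadj⟩, rfl⟩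
  · exact List.pairwise_map.2 (((enum_pairwise l2 0).filter _).imp fun h => h)

lemma core (l2 : List (Int × Int)) (c1 : Int × Int) :
    (PySem.List.sorted (pvIdxs l2 c1) (fun j => j)).map
        (fun j => [c1, PySem.List.pyGetD l2 j (0, 0)]) =
      (l2.filter (fun c2 => pvAdj c1 c2)).map (fun c2 => [c1, c2]) := by
  rw [sorted_idxs, List.map_map]
  have h1 : ∀ p ∈ (PySem.List.enumerate l2 0).filter (fun p => pvAdj c1 p.2),
      ((fun j => [c1, PySem.List.pyGetD l2 j (0, 0)]) ∘ (·.1)) p = [c1, p.2] := by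
    intro p hp
    rw [List.mem_filter] at hp
    obtain ⟨k, hk, hks⟩ := (mem_enum l2 0 p).1 hp.1
    simp only [Function.comp_apply]
    rw [hks, zero_add, PySem.List.pyGetD_natCast]
    rw [List.getD_eq_getElem?_getD, hk]
    rfl
  rw [List.map_congr_left h1]
  conv_rhs => rw [← enum_snd l2 0]
  rw [List.filter_map, List.map_map]
  rfl

lemma A_loop (K : String) (l2 : List (Int × Int)) (c1 : Int × Int)
    (acc : PySem.Dict String (List (List (Int × Int)))) :
    List.foldl (fun c c2 =>
        if |c1.1 - c2.1| < 2 ∧ |c1.2 - c2.2| < 2 then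
          c.modify K [] (· ++ [[c1, c2]])
        else c) acc l2
    = List.foldl (fun c x => c.modify K [] (· ++ [x])) acc
        ((l2.filter (fun c2 => pvAdj c1 c2)).map (fun c2 => [c1, c2])) := by
  induction l2 generalizing acc with
  | nil => rfl
  | cons x t ih =>
    by_cases h : |c1.1 - x.1| < 2 ∧ |c1.2 - x.2| < 2
    · have hb : pvAdj c1 x = true := decide_eq_true h
      simp only [List.foldl_cons, if_pos h, List.filter_cons, hb, if_true, List.map_cons]
      exact ih _
    · have hb : pvAdj c1 x = false := decide_eq_false h
      simp only [List.foldl_cons, if_neg h, List.filter_cons, hb, Bool.false_eq_true,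
        if_false]
      exact ih _

lemma inner_eq (K : String) (l2 : List (Int × Int)) (c1 : Int × Int)
    (acc : PySem.Dict String (List (List (Int × Int)))) :
    l2.foldl (fun c c2 =>
        if |c1.1 - c2.1| < 2 ∧ |c1.2 - c2.2| < 2 then
          c.modify K [] (· ++ [[c1, c2]])
        else c) acc
    = (PySem.List.sorted (pvIdxs l2 c1) (fun j => j)).foldl
        (fun c j => c.modify K [] (· ++ [[c1, PySem.List.pyGetD l2 j (0, 0)]])) acc := by
  rw [A_loop, ← core, List.foldl_map]

theorem findcon_eq (chars : List (String × List (Int × Int))) :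
    findcon chars = findcon_alt chars := by
  simp only [findcon, findcon_alt]
  congr 1
  apply PySem.List.foldl_congr_mem
  intro acc i _
  apply PySem.List.foldl_congr_mem
  intro acc2 c1 _
  exact inner_eq _ _ _ _

-- ===== VERDICT (by name: the statement is the Claim_ definition above) =====
theorem findcon_spec : Claim_equal_findcon := by
  intro chars _
  unfold Spec_findcon
  exact findcon_eq chars
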